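-- pv_equiv track=rewrite | github.com/dusty736/nfl_modeler | modeling/Python/pregame_total_modelfit.py | _orig_from_processed
-- ===== SOURCE A (Python) =====
-- def _orig_from_processed(name: str, cat_features: list) -> str:
--     if name.startswith("num__"):
--         return name[5:]
--     if name.startswith("cat__"):
--         s = name.split("__", 2)[-1]
--         best = None
--         for f in cat_features:
--             pref = f + "_"
--             if s.startswith(pref) and (best is None or len(f) > len(best)):
--                 best = f
--         return best if best is not None else s
--     return name
-- ===== SOURCE B (Python) =====
-- def _orig_from_processed(name: str, cat_features: list) -> str:
--     if name.startswith("num__"):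
--         return name[5:]
--     if not name.startswith("cat__"):
--         return name
--     s = name.split("__", 2)[-1]
--     cand = set(cat_features)
--     for i in range(len(s) - 1, -1, -1):
--         if s[i] == "_" and s[:i] in cand:
--             return s[:i]
--     return s
-- ===== Notes on version B (the rewrite author's own statement) =====
-- stated objective: alternative
-- what changed: The cat__ branch no longer scans cat_features prefix-testing each feature: B builds a set of the features once and walks underscore positions of the transformed suffix from right to left, returning the first (hence longest) prefix s[:i] that is a feature.
import Mathlib
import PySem

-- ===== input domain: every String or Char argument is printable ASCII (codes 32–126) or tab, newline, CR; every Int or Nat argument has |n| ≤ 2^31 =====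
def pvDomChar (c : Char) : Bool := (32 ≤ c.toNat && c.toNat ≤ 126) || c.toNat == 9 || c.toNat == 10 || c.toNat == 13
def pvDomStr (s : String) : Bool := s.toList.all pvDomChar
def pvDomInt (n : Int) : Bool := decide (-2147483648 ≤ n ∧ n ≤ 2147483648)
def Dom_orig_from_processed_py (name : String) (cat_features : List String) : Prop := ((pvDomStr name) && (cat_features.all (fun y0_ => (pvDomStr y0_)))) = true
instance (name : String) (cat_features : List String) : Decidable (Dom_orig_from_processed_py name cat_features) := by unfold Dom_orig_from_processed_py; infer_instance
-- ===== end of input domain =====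

-- B rewrites the cat__ branch: instead of prefix-testing every categorical feature against s,
-- it builds a set of the features once and scans the positions of s from RIGHT to LEFT,
-- returning at the first underscore position i whose prefix s[:i] is a feature — which is
-- the longest such prefix, i.e. exactly A's answer (objective: alternative algorithm).

-- ===== PORT A =====
def orig_from_processed_py (name : String) (cat_features : List String) : Option String :=
  if PySem.Str.startswith name "num__" then
    some (PySem.Str.slice name (some 5) none)
  else if PySem.Str.startswith name "cat__" then
    let s := (PySem.List.pyGet? ((PySem.Str.splitMax? name "__" 2).getD []) (-1)).getD ""
    let best := cat_features.foldl (fun best f =>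
      let pref := f ++ "_"
      if PySem.Str.startswith s pref &&
          (match best with
           | none => true
           | some b => decide (PySem.Str.len f > PySem.Str.len b)) then
        some f
      else best) none
    some (match best with | some b => b | none => s)
  else
    some name

-- ===== PORT B =====
-- the `for i in range(len(s)-1, -1, -1): if …: return s[:i]` loop of Source B, as a downward
-- recursion on the remaining fuel (k+1 examines index i = k, then falls through to k)
def pvScanDown (s : String) (cand : PySem.Set String) : Nat → Option String
  | 0 => none
  | k + 1 =>
    if (PySem.Str.pyGet? s (k : Int) == some '_') &&
        PySem.Set.contains cand (PySem.Str.slice s none (some (k : Int))) then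
      some (PySem.Str.slice s none (some (k : Int)))
    else pvScanDown s cand k

def orig_from_processed_py_alt (name : String) (cat_features : List String) : Option String :=
  if PySem.Str.startswith name "num__" then
    some (PySem.Str.slice name (some 5) none)
  else if !PySem.Str.startswith name "cat__" then
    some name
  else
    let s := (PySem.List.pyGet? ((PySem.Str.splitMax? name "__" 2).getD []) (-1)).getD ""
    let cand := PySem.Set.ofList cat_features
    match pvScanDown s cand s.toList.length with
    | some b => some b
    | none => some s

-- ===== PRECONDITION & SPEC =====
def Spec_orig_from_processed_py (name : String) (cat_features : List String) (out : Option String) : Prop := out = orig_from_processed_py_alt name cat_features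
instance (name : String) (cat_features : List String) (out : Option String) : Decidable (Spec_orig_from_processed_py name cat_features out) := by unfold Spec_orig_from_processed_py; infer_instance

-- ===== CLAIM (what is proved, stated in full; the proofs are below) =====
def Claim_equal_orig_from_processed_py : Prop := ∀ (name : String) (cat_features : List String), Dom_orig_from_processed_py name cat_features → Spec_orig_from_processed_py name cat_features (orig_from_processed_py name cat_features)

-- ===== LEMMAS AND PROOFS =====

theorem pvMatch_iff (t : List Char) (f : String) :
    PySem.Chars.startswith t (f.toList ++ ['_']) = true ↔
      (t.take f.toList.length = f.toList ∧ t[f.toList.length]? = some '_') := by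
  rw [PySem.Chars.startswith, List.isPrefixOf_iff_prefix, List.prefix_iff_eq_take]
  have hlen : (f.toList ++ ['_']).length = f.toList.length + 1 := by simp
  rw [hlen, List.take_add_one]
  set n := f.toList.length with hn
  constructor
  · intro h
    cases hg : t[n]? with
    | none =>
      rw [hg] at h
      have := congrArg List.length h
      simp [← hn] at this
      have := List.length_take_le n t
      omega
    | some c =>
      rw [hg] at h
      simp only [Option.toList_some] at h
      have hl : f.toList.length = (List.take n t).length := by
        have := congrArg List.length h
        simp only [List.length_append, List.length_singleton] at this
        omega
      obtain ⟨h1, h2⟩ := List.append_inj h hl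
      simp only [List.cons.injEq] at h2
      exact ⟨h1.symm, congrArg some h2.1.symm⟩
  · rintro ⟨h1, h2⟩
    rw [h1, h2]
    simp

def pvGood (t : List Char) (l : List String) (k : Nat) : Prop :=
  t[k]? = some '_' ∧ String.ofList (t.take k) ∈ l

def pvMaxSpec (t : List Char) (l : List String) (o : Option Nat) : Prop :=
  (∀ m, o = some m → pvGood t l m) ∧ (∀ k, pvGood t l k → ∃ m, o = some m ∧ k ≤ m)

theorem pvMaxSpec_unique {t : List Char} {l : List String} {o₁ o₂ : Option Nat}
    (h₁ : pvMaxSpec t l o₁) (h₂ : pvMaxSpec t l o₂) : o₁ = o₂ := by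
  cases o₁ with
  | none =>
    cases o₂ with
    | none => rfl
    | some m =>
      obtain ⟨m', hm', _⟩ := h₁.2 m (h₂.1 m rfl)
      exact absurd hm' (by simp)
  | some m =>
    obtain ⟨m₂, hm₂, hle⟩ := h₂.2 m (h₁.1 m rfl)
    obtain ⟨m₁, hm₁, hle'⟩ := h₁.2 m₂ (h₂.1 m₂ hm₂)
    rw [hm₂]
    simp only [Option.some.injEq] at hm₁ ⊢
    omega

-- A's startswith test, moved to List Char
theorem pvStartswith_eq (s f : String) :
    PySem.Str.startswith s (f ++ "_") = PySem.Chars.startswith s.toList (f.toList ++ ['_']) := by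
  rw [PySem.Str.startswith_eq]
  congr 1
  simp

def pvCondA (s : String) (best : Option String) (f : String) : Bool :=
  PySem.Str.startswith s (f ++ "_") &&
    (match best with | none => true | some b => decide (PySem.Str.len f > PySem.Str.len b))

def pvStepA (s : String) (best : Option String) (f : String) : Option String :=
  if pvCondA s best f then some f else best

-- the accumulator well-formedness for A's fold
def pvWfA (s : String) (o : Option String) : Prop :=
  ∀ b, o = some b → b = String.ofList (s.toList.take b.toList.length) ∧ s.toList[b.toList.length]? = some '_'

theorem pvA_fold (s : String) (l : List String) (acc : Option String) (hacc : pvWfA s acc) :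
    (∀ b, l.foldl (pvStepA s) acc = some b →
      (b = String.ofList (s.toList.take b.toList.length) ∧ s.toList[b.toList.length]? = some '_') ∧ (acc = some b ∨ b ∈ l)) ∧
    (∀ b, acc = some b → ∃ b', l.foldl (pvStepA s) acc = some b' ∧ b.toList.length ≤ b'.toList.length) ∧
    (∀ f, f ∈ l → PySem.Str.startswith s (f ++ "_") = true →
      ∃ b', l.foldl (pvStepA s) acc = some b' ∧ f.toList.length ≤ b'.toList.length) := by
  induction l generalizing acc with
  | nil =>
    exact ⟨fun b hb => ⟨hacc b hb, Or.inl hb⟩, fun b hb => ⟨b, hb, le_refl _⟩, fun f hf => absurd hf (by simp)⟩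
  | cons f l ih =>
    rw [List.foldl_cons]
    by_cases hcv : pvCondA s acc f = true
    · -- step takes f
      have hmatch : PySem.Str.startswith s (f ++ "_") = true := (Bool.and_eq_true_iff.mp hcv).1
      have hstep : pvStepA s acc f = some f := by rw [pvStepA, if_pos hcv]
      have hwf : pvWfA s (some f) := by
        intro b hb
        injection hb with hb; subst hb
        rw [pvStartswith_eq] at hmatch
        obtain ⟨h1, h2⟩ := (pvMatch_iff s.toList f).mp hmatch
        exact ⟨by rw [h1, String.ofList_toList], h2⟩
      obtain ⟨ih1, ih2, ih3⟩ := ih (some f) hwf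
      rw [hstep]
      refine ⟨?_, ?_, ?_⟩
      · intro b hb
        obtain ⟨hw, hor⟩ := ih1 b hb
        refine ⟨hw, Or.inr ?_⟩
        rcases hor with h | h
        · injection h with h; rw [← h]; exact List.mem_cons_self ..
        · exact List.mem_cons_of_mem _ h
      · intro b hb
        subst hb
        have hgt : (b.toList.length : Int) < f.toList.length := by
          have := (Bool.and_eq_true_iff.mp hcv).2
          simp only [decide_eq_true_eq] at this
          simpa [PySem.Str.len] using this
        obtain ⟨b', hb', hle⟩ := ih2 f rfl
        exact ⟨b', hb', by omega⟩
      · intro g hg hgm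
        rcases List.mem_cons.mp hg with h | h
        · subst h
          exact ih2 g rfl
        · exact ih3 g h hgm
    · -- step keeps acc
      have hstep : pvStepA s acc f = acc := by rw [pvStepA, if_neg hcv]
      obtain ⟨ih1, ih2, ih3⟩ := ih acc hacc
      rw [hstep]
      refine ⟨?_, ?_, ?_⟩
      · intro b hb
        obtain ⟨hw, hor⟩ := ih1 b hb
        exact ⟨hw, hor.imp id (List.mem_cons_of_mem _)⟩
      · exact ih2
      · intro g hg hgm
        rcases List.mem_cons.mp hg with h | h
        · subst h
          cases acc with
          | none => exact absurd (by simp only [pvCondA, Bool.and_true]; exact hgm) hcv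
          | some b =>
            have hle : (g.toList.length : Int) ≤ b.toList.length := by
              by_contra hlt
              apply hcv
              simp only [pvCondA, hgm, Bool.true_and, decide_eq_true_eq]
              simp only [not_le] at hlt
              simpa [PySem.Str.len] using hlt
            obtain ⟨b', hb', hle'⟩ := ih2 b rfl
            exact ⟨b', hb', by omega⟩
        · exact ih3 g h hgm

theorem pvSlice_take (s : String) (k : Nat) :
    PySem.Str.slice s none (some (k : Int)) = String.ofList (s.toList.take k) := by
  have h : (PySem.Str.slice s none (some (k : Int))).toList = s.toList.take k := by
    rw [PySem.Str.toList_slice, PySem.Chars.slice_eq_listSlice, PySem.List.slice_to_natCast]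
  rw [← h, String.ofList_toList]

theorem pvGet_nat (s : String) (k : Nat) :
    PySem.Str.pyGet? s (k : Int) = s.toList[k]? := by
  rw [PySem.Str.pyGet?_eq, PySem.Chars.pyGet?_eq_listPyGet?, PySem.List.pyGet?_natCast]

-- B's loop guard at index k, as a proposition
theorem pvGuard_iff (s : String) (l : List String) (k : Nat) :
    ((PySem.Str.pyGet? s (k : Int) == some '_') &&
      PySem.Set.contains (PySem.Set.ofList l) (PySem.Str.slice s none (some (k : Int)))) = true
      ↔ pvGood s.toList l k := by
  rw [pvGet_nat, pvSlice_take, Bool.and_eq_true_iff, beq_iff_eq, pvGood]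
  rw [PySem.Set.contains, List.contains_iff_mem]
  rw [show ((String.ofList (s.toList.take k)) ∈ PySem.Set.ofList l) ↔ _ from PySem.Set.mem_ofList l _]

theorem pvScanDown_spec (s : String) (l : List String) (m : Nat) (hm : m ≤ s.toList.length) :
    (∀ b, pvScanDown s (PySem.Set.ofList l) m = some b →
        ∃ k, k < m ∧ pvGood s.toList l k ∧ b = String.ofList (s.toList.take k)) ∧
    (∀ k, k < m → pvGood s.toList l k →
        ∃ b, pvScanDown s (PySem.Set.ofList l) m = some b ∧ k ≤ b.toList.length) := by
  induction m with
  | zero =>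
    exact ⟨fun b hb => by simp [pvScanDown] at hb, fun k hk => absurd hk (by omega)⟩
  | succ m ih =>
    obtain ⟨ih1, ih2⟩ := ih (by omega)
    rw [pvScanDown]
    by_cases hc : ((PySem.Str.pyGet? s (m : Int) == some '_') &&
        PySem.Set.contains (PySem.Set.ofList l) (PySem.Str.slice s none (some (m : Int)))) = true
    · rw [if_pos hc, pvSlice_take]
      have hgoodm : pvGood s.toList l m := (pvGuard_iff s l m).mp hc
      have hlen : (String.ofList (s.toList.take m)).toList.length = m := by
        rw [String.toList_ofList, List.length_take]
        omega
      refine ⟨?_, ?_⟩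
      · intro b hb
        injection hb with hb
        exact ⟨m, by omega, hgoodm, hb.symm⟩
      · intro k hk hgood
        exact ⟨String.ofList (s.toList.take m), rfl, by omega⟩
    · rw [if_neg hc]
      refine ⟨?_, ?_⟩
      · intro b hb
        obtain ⟨k, hk, hg, hb⟩ := ih1 b hb
        exact ⟨k, by omega, hg, hb⟩
      · intro k hk hgood
        rcases Nat.lt_succ_iff_lt_or_eq.mp hk with h | h
        · exact ih2 k h hgood
        · subst h
          exact absurd ((pvGuard_iff s l k).mpr hgood) hc

theorem pvScan_eq (s : String) (l : List String) :
    l.foldl (pvStepA s) none = pvScanDown s (PySem.Set.ofList l) s.toList.length := by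
  obtain ⟨a1, a2, a3⟩ := pvA_fold s l none (fun b hb => by simp at hb)
  obtain ⟨b1, b2⟩ := pvScanDown_spec s l s.toList.length (le_refl _)
  have hA : pvMaxSpec s.toList l ((l.foldl (pvStepA s) none).map (fun b => b.toList.length)) := by
    constructor
    · intro mv hmv
      cases hA' : l.foldl (pvStepA s) none with
      | none => rw [hA'] at hmv; simp at hmv
      | some b =>
        rw [hA'] at hmv
        simp only [Option.map_some, Option.some.injEq] at hmv
        subst hmv
        obtain ⟨⟨hb1, hb2⟩, hor⟩ := a1 b hA'
        refine ⟨hb2, ?_⟩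
        rcases hor with h | h
        · simp at h
        · rw [← hb1]; exact h
    · intro k hgood
      have hk : k < s.toList.length := (List.getElem?_eq_some_iff.mp hgood.1).1
      have hf : (String.ofList (s.toList.take k)).toList = s.toList.take k := String.toList_ofList
      have hlenf : (String.ofList (s.toList.take k)).toList.length = k := by
        rw [hf, List.length_take]; omega
      have hmatch : PySem.Str.startswith s (String.ofList (s.toList.take k) ++ "_") = true := by
        rw [pvStartswith_eq]
        apply (pvMatch_iff s.toList _).mpr
        rw [hlenf, hf]
        exact ⟨rfl, hgood.1⟩
      obtain ⟨b', hb', hle⟩ := a3 _ hgood.2 hmatch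
      rw [hlenf] at hle
      exact ⟨b'.toList.length, by rw [hb']; rfl, hle⟩
  have hB : pvMaxSpec s.toList l
      ((pvScanDown s (PySem.Set.ofList l) s.toList.length).map (fun b => b.toList.length)) := by
    constructor
    · intro mv hmv
      cases hB' : pvScanDown s (PySem.Set.ofList l) s.toList.length with
      | none => rw [hB'] at hmv; simp at hmv
      | some b =>
        rw [hB'] at hmv
        simp only [Option.map_some, Option.some.injEq] at hmv
        obtain ⟨k, hk, hgood, hb⟩ := b1 b hB'
        have : b.toList.length = k := by
          rw [hb, String.toList_ofList, List.length_take]; omega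
        rw [← hmv, this]
        exact hgood
    · intro k hgood
      have hk : k < s.toList.length := (List.getElem?_eq_some_iff.mp hgood.1).1
      obtain ⟨b, hb, hle⟩ := b2 k hk hgood
      exact ⟨b.toList.length, by rw [hb]; rfl, hle⟩
  have heq := pvMaxSpec_unique hA hB
  cases hA' : l.foldl (pvStepA s) none with
  | none =>
    cases hB' : pvScanDown s (PySem.Set.ofList l) s.toList.length with
    | none => rfl
    | some b => rw [hA', hB'] at heq; simp at heq
  | some a =>
    cases hB' : pvScanDown s (PySem.Set.ofList l) s.toList.length with
    | none => rw [hA', hB'] at heq; simp at heq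
    | some b =>
      rw [hA', hB'] at heq
      simp only [Option.map_some, Option.some.injEq] at heq
      obtain ⟨⟨ha1, _⟩, _⟩ := a1 a hA'
      obtain ⟨k, hk, _, hb⟩ := b1 b hB'
      have hbk : b.toList.length = k := by
        rw [hb, String.toList_ofList, List.length_take]; omega
      rw [ha1, hb]
      congr 2
      rw [heq, hbk]

theorem pvBranch (s : String) (l : List String) :
    (some (match l.foldl (fun best f =>
        let pref := f ++ "_"
        if PySem.Str.startswith s pref &&
            (match best with
             | none => true
             | some b => decide (PySem.Str.len f > PySem.Str.len b)) then
          some f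
        else best) none with | some b => b | none => s) : Option String) =
    (match pvScanDown s (PySem.Set.ofList l) s.toList.length with
     | some b => some b
     | none => some s) := by
  have h := pvScan_eq s l
  have hAB : l.foldl (fun best f =>
        let pref := f ++ "_"
        if PySem.Str.startswith s pref &&
            (match best with
             | none => true
             | some b => decide (PySem.Str.len f > PySem.Str.len b)) then
          some f
        else best) none = pvScanDown s (PySem.Set.ofList l) s.toList.length := h
  rw [hAB]
  cases pvScanDown s (PySem.Set.ofList l) s.toList.length <;> rfl

-- ===== VERDICT (by name: the statement is the Claim_ definition above) =====
theorem orig_from_processed_py_spec : Claim_equal_orig_from_processed_py := by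
  intro name l _
  show orig_from_processed_py name l = orig_from_processed_py_alt name l
  rw [orig_from_processed_py, orig_from_processed_py_alt]
  by_cases h1 : PySem.Str.startswith name "num__" = true
  · rw [if_pos h1, if_pos h1]
  · rw [if_neg h1, if_neg h1]
    by_cases h2 : PySem.Str.startswith name "cat__" = true
    · rw [if_pos h2, if_neg (by rw [h2]; decide)]
      exact pvBranch ((PySem.List.pyGet? ((PySem.Str.splitMax? name "__" 2).getD []) (-1)).getD "") l
    · rw [if_neg h2, if_pos (by rw [Bool.not_eq_true] at h2; rw [h2]; rfl)]
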